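-- pv_equiv track=rewrite | github.com/fdgbatarse1/langlish | airflow/src/merge_session.py | merge_sessions
-- ===== SOURCE A (Python) =====
-- from collections import defaultdict
-- from typing import List, Dict
--
-- def merge_sessions(session_data_list: List[Dict]) -> List[Dict]:
--     """
--     Merge conversation turns by session_id into a single conversation per session.
--
--     Parameters:
--         session_data_list: List of dictionaries, each with 'session_id', 'student_message', and 'model_response'.
--
--     Returns:
--         List of dictionaries, one per session_id, with combined user and assistant texts.
--     """
--     merged = defaultdict(lambda: {"session_id": "", "user": [], "assistant": []})
--
--     for item in session_data_list:
--         session_id = item["session_id"]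
--         merged[session_id]["session_id"] = session_id
--         merged[session_id]["user"].append(item.get("student_message", ""))
--         merged[session_id]["assistant"].append(item.get("model_response", ""))
--
--     # Convert merged structure to list of dicts
--     result = []
--     for session_id, convo in merged.items():
--         result.append({
--             "session_id": session_id,
--             "user": " ".join(convo["user"]),
--             "assistant": " ".join(convo["assistant"])
--         })
--
--     return result
-- ===== SOURCE B (Python) =====
-- def merge_sessions(session_data_list):
--     # Scan once for first-appearance order of session ids, then rescan per id.
--     seen = set()
--     order = []
--     for item in session_data_list:
--         sid = item["session_id"]
--         if sid not in seen:
--             seen.add(sid)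
--             order.append(sid)
--     return [
--         {
--             "session_id": sid,
--             "user": " ".join(it.get("student_message", "")
--                              for it in session_data_list if it["session_id"] == sid),
--             "assistant": " ".join(it.get("model_response", "")
--                                   for it in session_data_list if it["session_id"] == sid),
--         }
--         for sid in order
--     ]
-- ===== Notes on version B (the rewrite author's own statement) =====
-- stated objective: alternative
-- what changed: Replaced the single defaultdict grouping pass with a first-appearance key scan (seen-set + order list) followed by per-key rescans of the input that collect and join each group's messages.
import Mathlib
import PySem

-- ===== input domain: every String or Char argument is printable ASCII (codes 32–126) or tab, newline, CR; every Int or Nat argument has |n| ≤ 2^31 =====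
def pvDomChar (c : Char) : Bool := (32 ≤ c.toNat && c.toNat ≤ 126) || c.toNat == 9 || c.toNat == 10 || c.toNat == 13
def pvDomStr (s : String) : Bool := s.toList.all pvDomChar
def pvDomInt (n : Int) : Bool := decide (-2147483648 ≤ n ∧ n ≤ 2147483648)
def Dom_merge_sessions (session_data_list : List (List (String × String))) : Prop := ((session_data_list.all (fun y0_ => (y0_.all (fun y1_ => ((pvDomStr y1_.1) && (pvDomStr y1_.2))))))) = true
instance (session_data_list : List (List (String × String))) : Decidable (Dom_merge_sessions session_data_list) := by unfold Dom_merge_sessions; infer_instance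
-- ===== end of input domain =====

-- B groups by a first-appearance key scan plus per-key rescans instead of A's single
-- defaultdict pass; a different decomposition of the same task, not claimed faster.

-- item.get(k, "") on a dict modelled as an association list (first-match lookup);
-- under Pre_ it is also exact for item["session_id"] (the key is present).
def pvItemGet (item : List (String × String)) (k : String) : String :=
  (PySem.Dict.mk item).getD k ""

-- ===== PORT A =====
-- loop body of A's grouping pass (value = the dict {"session_id": ..., "user": [...], "assistant": [...]})
def pvStepA (m : PySem.Dict String (String × List String × List String))
    (item : List (String × String)) : PySem.Dict String (String × List String × List String) :=
  let sid := pvItemGet item "session_id"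
  let cur := m.getD sid ("", [], [])
  m.insert sid (sid, cur.2.1 ++ [pvItemGet item "student_message"],
                     cur.2.2 ++ [pvItemGet item "model_response"])

def merge_sessions (session_data_list : List (List (String × String))) : List (List (String × String)) :=
  let merged := session_data_list.foldl pvStepA PySem.Dict.empty
  merged.items.map (fun p =>
    [("session_id", p.1),
     ("user", PySem.Str.join " " p.2.2.1),
     ("assistant", PySem.Str.join " " p.2.2.2)])

-- ===== PORT B =====
-- loop body of B's first pass: seen-set + first-appearance order list
def pvStepB (st : PySem.Set String × List String)
    (item : List (String × String)) : PySem.Set String × List String :=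
  let sid := pvItemGet item "session_id"
  if PySem.Set.contains st.1 sid then st
  else (PySem.Set.add st.1 sid, st.2 ++ [sid])

def merge_sessions_alt (session_data_list : List (List (String × String))) : List (List (String × String)) :=
  let order := (session_data_list.foldl pvStepB (PySem.Set.empty, [])).2
  order.map (fun sid =>
    [("session_id", sid),
     ("user", PySem.Str.join " "
        ((session_data_list.filter (fun it => pvItemGet it "session_id" == sid)).map
          (fun it => pvItemGet it "student_message"))),
     ("assistant", PySem.Str.join " "
        ((session_data_list.filter (fun it => pvItemGet it "session_id" == sid)).map
          (fun it => pvItemGet it "model_response")))])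

-- ===== PRECONDITION & SPEC =====
-- Pre_ excludes exactly the inputs where item["session_id"] raises KeyError in both
-- A and B: every item must carry the key "session_id".
def Pre_merge_sessions (session_data_list : List (List (String × String))) : Prop :=
  ∀ item ∈ session_data_list, "session_id" ∈ item.map Prod.fst
instance (session_data_list : List (List (String × String))) : Decidable (Pre_merge_sessions session_data_list) := by unfold Pre_merge_sessions; infer_instance

def pvWitness_merge_sessions : (List (List (String × String))) :=
  [[("session_id", "s1"), ("student_message", "hi"), ("model_response", "hello")],
   [("session_id", "s1"), ("student_message", "bye")],
   [("session_id", "s2"), ("model_response", "ok")]]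

def Spec_merge_sessions (session_data_list : List (List (String × String))) (out : List (List (String × String))) : Prop := out = merge_sessions_alt session_data_list
instance (session_data_list : List (List (String × String))) (out : List (List (String × String))) : Decidable (Spec_merge_sessions session_data_list out) := by unfold Spec_merge_sessions; infer_instance

-- ===== CLAIM (what is proved, stated in full; the proofs are below) =====
def Claim_equal_merge_sessions : Prop := ∀ (session_data_list : List (List (String × String))), Dom_merge_sessions session_data_list → Pre_merge_sessions session_data_list → Spec_merge_sessions session_data_list (merge_sessions session_data_list)

-- ===== LEMMAS AND PROOFS =====

def pvKey (it : List (String × String)) : String := pvItemGet it "session_id"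

def pvUsers (l : List (List (String × String))) (sid : String) : List String :=
  (l.filter (fun it => pvItemGet it "session_id" == sid)).map (fun it => pvItemGet it "student_message")

def pvAsst (l : List (List (String × String))) (sid : String) : List String :=
  (l.filter (fun it => pvItemGet it "session_id" == sid)).map (fun it => pvItemGet it "model_response")

def pvSpecItems (p : List (List (String × String))) :
    List (String × (String × List String × List String)) :=
  (PySem.List.dedup (p.map pvKey)).map (fun sid => (sid, sid, pvUsers p sid, pvAsst p sid))

lemma pvDedup_append_singleton {α : Type} [BEq α] [LawfulBEq α] (ys : List α) (a : α) :
    PySem.List.dedup (ys ++ [a]) =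
      if a ∈ PySem.List.dedup ys then PySem.List.dedup ys else PySem.List.dedup ys ++ [a] := by
  simp only [PySem.List.dedup_eq_ofList, PySem.Set.ofList_eq_foldl, List.foldl_append,
    List.foldl_cons, List.foldl_nil, PySem.Set.add]
  split_ifs with h1 h2 h2 <;> simp_all [PySem.Set.contains, ← PySem.Set.ofList_eq_foldl]

lemma pvUsers_append (l : List (List (String × String))) (x : List (String × String)) (sid : String) :
    pvUsers (l ++ [x]) sid =
      pvUsers l sid ++ (if pvKey x = sid then [pvItemGet x "student_message"] else []) := by
  simp only [pvUsers, List.filter_append, List.map_append, pvKey]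
  split_ifs with h
  · simp [List.filter, h]
  · simp [List.filter, beq_eq_false_iff_ne.mpr h]

lemma pvAsst_append (l : List (List (String × String))) (x : List (String × String)) (sid : String) :
    pvAsst (l ++ [x]) sid =
      pvAsst l sid ++ (if pvKey x = sid then [pvItemGet x "model_response"] else []) := by
  simp only [pvAsst, List.filter_append, List.map_append, pvKey]
  split_ifs with h
  · simp [List.filter, h]
  · simp [List.filter, beq_eq_false_iff_ne.mpr h]

lemma pvUsers_nil_of_not_mem (l : List (List (String × String))) (sid : String)
    (h : sid ∉ l.map pvKey) : pvUsers l sid = [] := by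
  simp only [pvUsers, List.map_eq_nil_iff, List.filter_eq_nil_iff]
  intro it hit
  simp only [beq_iff_eq]
  intro he; exact h (List.mem_map.mpr ⟨it, hit, he⟩)

lemma pvAsst_nil_of_not_mem (l : List (List (String × String))) (sid : String)
    (h : sid ∉ l.map pvKey) : pvAsst l sid = [] := by
  simp only [pvAsst, List.map_eq_nil_iff, List.filter_eq_nil_iff]
  intro it hit
  simp only [beq_iff_eq]
  intro he; exact h (List.mem_map.mpr ⟨it, hit, he⟩)

lemma pvKeys_spec (p : List (List (String × String))) :
    (PySem.Dict.mk (pvSpecItems p)).keys = PySem.List.dedup (p.map pvKey) := by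
  simp [PySem.Dict.keys, pvSpecItems, List.map_map, Function.comp_def]

lemma pvKey_def (it : List (String × String)) : pvItemGet it "session_id" = pvKey it := rfl

lemma pvStepA_spec (p : List (List (String × String))) (x : List (String × String)) :
    pvStepA (PySem.Dict.mk (pvSpecItems p)) x = PySem.Dict.mk (pvSpecItems (p ++ [x])) := by
  have hkeys := pvKeys_spec p
  have hnodup : (PySem.Dict.mk (pvSpecItems p)).keys.Nodup := by
    rw [hkeys]; exact PySem.List.nodup_dedup _
  apply PySem.Dict.ext
  simp only [pvStepA, pvKey_def]
  by_cases hs : pvKey x ∈ PySem.List.dedup (p.map pvKey)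
  · have hcont : (PySem.Dict.mk (pvSpecItems p)).contains (pvKey x) = true := by
      rw [PySem.Dict.contains_eq_decide_mem_keys, hkeys]; exact decide_eq_true hs
    have hmem : ((pvKey x), (pvKey x, pvUsers p (pvKey x), pvAsst p (pvKey x))) ∈
        (PySem.Dict.mk (pvSpecItems p)).items := List.mem_map.mpr ⟨_, hs, rfl⟩
    have hget : (PySem.Dict.mk (pvSpecItems p)).getD (pvKey x) ("", [], []) =
        (pvKey x, pvUsers p (pvKey x), pvAsst p (pvKey x)) :=
      PySem.Dict.getD_of_mem_items _ hmem hnodup _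
    rw [hget, PySem.Dict.items_insert_of_contains _ _ hcont]
    have hded : PySem.List.dedup ((p ++ [x]).map pvKey) = PySem.List.dedup (p.map pvKey) := by
      rw [List.map_append, List.map_singleton, pvDedup_append_singleton, if_pos hs]
    show (pvSpecItems p).map _ = (PySem.Dict.mk (pvSpecItems (p ++ [x]))).items
    have hitems : (PySem.Dict.mk (pvSpecItems (p ++ [x]))).items = pvSpecItems (p ++ [x]) := rfl
    rw [hitems]
    simp only [pvSpecItems, hded, List.map_map]
    apply List.map_congr_left
    intro sid _
    simp only [Function.comp_apply]
    by_cases hsid : sid = pvKey x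
    · subst hsid
      simp [pvUsers_append, pvAsst_append]
    · have : (sid == pvKey x) = false := beq_eq_false_iff_ne.mpr hsid
      simp [this, pvUsers_append, pvAsst_append, Ne.symm hsid]
  · have hcont : (PySem.Dict.mk (pvSpecItems p)).contains (pvKey x) = false := by
      rw [PySem.Dict.contains_eq_decide_mem_keys, hkeys]; exact decide_eq_false hs
    have hget : (PySem.Dict.mk (pvSpecItems p)).getD (pvKey x) ("", [], []) = ("", [], []) :=
      PySem.Dict.getD_of_not_contains _ _ hcont
    have hnm : pvKey x ∉ p.map pvKey := fun hm => hs ((PySem.List.mem_dedup _ _).mpr hm)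
    rw [hget, PySem.Dict.items_insert_of_not_contains _ _ hcont]
    have hded : PySem.List.dedup (p.map pvKey ++ [pvKey x]) =
        PySem.List.dedup (p.map pvKey) ++ [pvKey x] := by
      rw [pvDedup_append_singleton, if_neg hs]
    show (pvSpecItems p) ++ _ = pvSpecItems (p ++ [x])
    simp only [pvSpecItems, List.map_append, List.map_singleton, hded]
    congr 1
    · apply List.map_congr_left
      intro sid hsid
      have hne : pvKey x ≠ sid := fun he => hs (he ▸ hsid)
      simp [pvUsers_append, pvAsst_append, hne]
    · simp [pvUsers_append, pvAsst_append, pvUsers_nil_of_not_mem p _ hnm,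
        pvAsst_nil_of_not_mem p _ hnm]

lemma pvFoldA (l p : List (List (String × String))) :
    l.foldl pvStepA (PySem.Dict.mk (pvSpecItems p)) = PySem.Dict.mk (pvSpecItems (p ++ l)) := by
  induction l generalizing p with
  | nil => simp
  | cons x xs ih =>
      rw [List.foldl_cons, pvStepA_spec, ih]
      simp

lemma pvFoldB (l : List (List (String × String))) (o : List String) :
    l.foldl pvStepB (o, o) =
      (l.foldl (fun s x => PySem.Set.add s (pvKey x)) o,
       l.foldl (fun s x => PySem.Set.add s (pvKey x)) o) := by
  induction l generalizing o with
  | nil => rfl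
  | cons x xs ih =>
      rw [List.foldl_cons, List.foldl_cons]
      have h : pvStepB (o, o) x = (PySem.Set.add o (pvKey x), PySem.Set.add o (pvKey x)) := by
        simp only [pvStepB, PySem.Set.add, pvKey]
        split_ifs <;> rfl
      rw [h, ih]

-- ===== VERDICT (by name: the statement is the Claim_ definition above) =====
theorem merge_sessions_spec : Claim_equal_merge_sessions := by
  intro l _ _
  unfold Spec_merge_sessions merge_sessions merge_sessions_alt
  have hA : l.foldl pvStepA PySem.Dict.empty = PySem.Dict.mk (pvSpecItems l) := by
    have := pvFoldA l []
    simpa [pvSpecItems, PySem.List.dedup] using this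
  have hB : (l.foldl pvStepB (PySem.Set.empty, [])).2 = PySem.List.dedup (l.map pvKey) := by
    rw [show (PySem.Set.empty : PySem.Set String) = ([] : List String) from rfl, pvFoldB]
    rw [← PySem.Set.update_map_eq_foldl_add, PySem.Set.update_nil_left,
      PySem.List.dedup_eq_ofList]
  rw [hA, hB]
  simp only [pvSpecItems, List.map_map]
  rfl
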